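-- pv_equiv track=rewrite | github.com/Zzoay/YaoNLP | examples/text_summarization/statistics_model.py | word_for_rouge
-- ===== SOURCE A (Python) =====
-- def word_for_rouge(summ, hyps):
--     word_dct = {}
--     cnt = 0
--     for c in summ:
--         if c in word_dct:
--             continue
--         word_dct[c] = str(cnt)
--         cnt += 1
--     for c in hyps:
--         if c in word_dct:
--             continue
--         word_dct[c] = str(cnt)
--         cnt += 1
--     summ_ids = [word_dct[c] for c in summ]
--     article_ids = [word_dct[c] for c in hyps]
--     return summ_ids, article_ids
-- ===== SOURCE B (Python) =====
-- def word_for_rouge(summ, hyps):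
--     # Dict-building-free: a character's id is a closed form -- the number of
--     # distinct characters occurring strictly before its first occurrence in
--     # summ+hyps -- which is exactly the first-appearance rank A's counter
--     # assigns. Computed once per distinct character, then looked up.
--     t = summ + hyps
--     ident = {c: str(len(set(t[:t.index(c)]))) for c in set(t)}
--     return [ident[c] for c in summ], [ident[c] for c in hyps]
-- ===== Notes on version B (the rewrite author's own statement) =====
-- stated objective: alternative
-- what changed: B has no id counter and no build-then-map dict passes: each character's id is a closed form - str(len(set(t[:t.index(c)]))) over t = summ+hyps, the count of distinct characters before c's first occurrence - computed once per distinct character and looked up, instead of A's stateful dict construction.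
import Mathlib
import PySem

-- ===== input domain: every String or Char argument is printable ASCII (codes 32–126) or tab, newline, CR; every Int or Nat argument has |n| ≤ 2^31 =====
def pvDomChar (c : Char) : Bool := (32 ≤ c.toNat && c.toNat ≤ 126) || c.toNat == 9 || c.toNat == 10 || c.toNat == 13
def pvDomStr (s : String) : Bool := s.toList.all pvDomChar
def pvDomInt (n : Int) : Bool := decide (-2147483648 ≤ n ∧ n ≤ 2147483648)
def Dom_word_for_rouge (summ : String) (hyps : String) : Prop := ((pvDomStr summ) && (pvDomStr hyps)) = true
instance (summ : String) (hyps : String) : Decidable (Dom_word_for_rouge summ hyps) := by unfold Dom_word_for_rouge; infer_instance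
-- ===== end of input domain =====

-- B replaces A's dict+counter build-then-map with a per-character closed form (distinct chars before first occurrence); equal output proved on Dom.


-- ===== PORT A =====
-- loop body of A's two dict-building loops: skip if seen, else word_dct[c] = str(cnt); cnt += 1
def wfrStep (p : PySem.Dict Char String × Int) (c : Char) : PySem.Dict Char String × Int :=
  if p.1.contains c then p else (p.1.insert c (PySem.Int.toStr p.2), p.2 + 1)

def word_for_rouge (summ : String) (hyps : String) : List String × List String :=
  let p1 := summ.toList.foldl wfrStep (PySem.Dict.empty, 0)
  let p2 := hyps.toList.foldl wfrStep p1
  -- word_dct[c] never raises here (every char was inserted); getD "" is exact on these lookups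
  (summ.toList.map (fun c => p2.1.getD c ""),
   hyps.toList.map (fun c => p2.1.getD c ""))

-- ===== PORT B =====
-- B's per-character id: str(len(set(t[:t.index(c)]))); t.index(c) never raises here (c ∈ t), so (index? …).getD 0 is exact on these calls
def wfrId (t : List Char) (c : Char) : String :=
  PySem.Int.toStr (((PySem.Set.ofList (t.take ((PySem.List.index? t c).getD 0))).length : Int))

-- the dict comprehension {c: wfrId(c) for c in set(t)}: iteration order of set(t) is unobservable
-- in the result (the dict is only looked up afterwards), so folding over PySem.Set.ofList t is exact;
-- ident[c] never raises (c ∈ set(t)), so getD "" is exact on these lookups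
def word_for_rouge_alt (summ : String) (hyps : String) : List String × List String :=
  let t := summ.toList ++ hyps.toList
  let ident := (PySem.Set.ofList t).foldl (fun d c => d.insert c (wfrId t c)) PySem.Dict.empty
  (summ.toList.map (fun c => ident.getD c ""), hyps.toList.map (fun c => ident.getD c ""))

-- ===== PRECONDITION & SPEC =====
def Spec_word_for_rouge (summ : String) (hyps : String) (out : List String × List String) : Prop := out = word_for_rouge_alt summ hyps
instance (summ : String) (hyps : String) (out : List String × List String) : Decidable (Spec_word_for_rouge summ hyps out) := by unfold Spec_word_for_rouge; infer_instance

-- ===== CLAIM (what is proved, stated in full; the proofs are below) =====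
def Claim_equal_word_for_rouge : Prop := ∀ (summ : String) (hyps : String), Dom_word_for_rouge summ hyps → Spec_word_for_rouge summ hyps (word_for_rouge summ hyps)

-- ===== LEMMAS AND PROOFS =====

-- invariant of A's fold from the empty state over a list l:
-- the counter is the number of distinct chars of l, containment is membership in l,
-- and the stored id of each c ∈ l is exactly B's closed form wfrId l c
-- B's closed form over a prefix agrees with the closed form over the full list
theorem wfrId_append (l t' : List Char) (c : Char) (h : c ∈ l) :
    wfrId (l ++ t') c = wfrId l c := by
  obtain ⟨k, hk⟩ := Option.isSome_iff_exists.mp ((PySem.List.index?_isSome_iff l c).mpr h)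
  obtain ⟨hlt, -⟩ := PySem.List.getElem_of_index?_eq_some hk
  simp only [wfrId]
  rw [PySem.List.index?_append_of_mem t' h, hk]
  simp [List.take_append_of_le_length (le_of_lt hlt)]

-- set(l ++ [a]) extends set(l) exactly when a is new
theorem setOfList_append_singleton (l : List Char) (a : Char) :
    PySem.Set.ofList (l ++ [a])
      = if a ∈ l then PySem.Set.ofList l else PySem.Set.ofList l ++ [a] := by
  have hstep : PySem.Set.ofList (l ++ [a]) = PySem.Set.add (PySem.Set.ofList l) a := by
    simp [PySem.Set.ofList_eq_foldl, List.foldl_append]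
  by_cases h : a ∈ l
  · rw [hstep]; simp [PySem.Set.add, h]
  · rw [hstep]; simp [PySem.Set.add, h]

-- invariant of A's fold from the empty state over a list l:
-- the counter is the number of distinct chars of l, containment is membership in l,
-- and the stored id of each c ∈ l is exactly B's closed form wfrId l c
theorem wfr_invariant (l : List Char) :
    (l.foldl wfrStep (PySem.Dict.empty, 0)).2 = ((PySem.Set.ofList l).length : Int) ∧
    (∀ c, (l.foldl wfrStep (PySem.Dict.empty, 0)).1.contains c = true ↔ c ∈ l) ∧
    (∀ c ∈ l, (l.foldl wfrStep (PySem.Dict.empty, 0)).1.getD c "" = wfrId l c) := by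
  induction l using List.reverseRecOn with
  | nil => exact ⟨rfl, fun c => by simp [pysem], fun c hc => absurd hc (List.not_mem_nil)⟩
  | append_singleton l a ih =>
    obtain ⟨hcnt, hcont, hget⟩ := ih
    by_cases hal : a ∈ l
    · have hstate : (l ++ [a]).foldl wfrStep (PySem.Dict.empty, 0)
          = l.foldl wfrStep (PySem.Dict.empty, 0) := by
        rw [List.foldl_append]
        simp [wfrStep, (hcont a).mpr hal]
      rw [hstate, setOfList_append_singleton, if_pos hal]
      refine ⟨hcnt, fun c => ?_, fun c hc => ?_⟩
      · rw [hcont c]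
        simp only [List.mem_append, List.mem_singleton]
        exact ⟨Or.inl, fun h => h.elim id (fun he => he ▸ hal)⟩
      · have hcl : c ∈ l := by
          rcases List.mem_append.mp hc with h | h
          · exact h
          · exact (List.mem_singleton.mp h) ▸ hal
        rw [wfrId_append l [a] c hcl]
        exact hget c hcl
    · have hnc : (l.foldl wfrStep (PySem.Dict.empty, 0)).1.contains a = false := by
        rw [Bool.eq_false_iff]
        exact fun hcc => hal ((hcont a).mp hcc)
      have hstate : (l ++ [a]).foldl wfrStep (PySem.Dict.empty, 0)
          = ((l.foldl wfrStep (PySem.Dict.empty, 0)).1.insert a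
               (PySem.Int.toStr (l.foldl wfrStep (PySem.Dict.empty, 0)).2),
             (l.foldl wfrStep (PySem.Dict.empty, 0)).2 + 1) := by
        rw [List.foldl_append]
        simp [wfrStep, hnc]
      rw [hstate, setOfList_append_singleton, if_neg hal]
      refine ⟨?_, fun c => ?_, fun c hc => ?_⟩
      · simp [hcnt]
      · by_cases hca : c = a
        · subst hca
          simp [pysem]
        · have : (((l.foldl wfrStep (PySem.Dict.empty, 0)).1.insert a
              (PySem.Int.toStr (l.foldl wfrStep (PySem.Dict.empty, 0)).2)).contains c)
              = (l.foldl wfrStep (PySem.Dict.empty, 0)).1.contains c := by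
            simp [pysem, hca]
          rw [this, hcont c]
          simp [List.mem_append, hca]
      · by_cases hca : c = a
        · subst hca
          have hidx := PySem.List.index?_append_singleton_self l c hal
          simp only [wfrId]
          rw [hidx]
          simp [pysem, hcnt]
        · have hcl : c ∈ l := by
            rcases List.mem_append.mp hc with h | h
            · exact h
            · exact absurd (List.mem_singleton.mp h) hca
          have heq : (((l.foldl wfrStep (PySem.Dict.empty, 0)).1.insert a
              (PySem.Int.toStr (l.foldl wfrStep (PySem.Dict.empty, 0)).2)).getD c "")
              = (l.foldl wfrStep (PySem.Dict.empty, 0)).1.getD c "" := by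
            simp [pysem, hca]
          rw [heq, wfrId_append l [a] c hcl]
          exact hget c hcl

-- looking up B's id table: a fold of inserts whose value depends only on the key
theorem getD_fold_insert_fun (l : List Char) (f : Char → String)
    (d : PySem.Dict Char String) (c : Char) (h : c ∈ l) :
    (l.foldl (fun d x => d.insert x (f x)) d).getD c "" = f c := by
  induction l using List.reverseRecOn with
  | nil => cases h
  | append_singleton l a ih =>
    rw [List.foldl_append]
    by_cases hca : c = a
    · subst hca; simp [pysem]
    · have hcl : c ∈ l := by
        rcases List.mem_append.mp h with h' | h'
        · exact h'
        · exact absurd (List.mem_singleton.mp h') hca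
      simpa [pysem, hca] using ih hcl

-- ===== VERDICT (by name: the statement is the Claim_ definition above) =====
theorem word_for_rouge_spec : Claim_equal_word_for_rouge := by
  intro summ hyps _
  unfold Spec_word_for_rouge word_for_rouge word_for_rouge_alt
  simp only [← List.foldl_append]
  obtain ⟨-, -, hget⟩ := wfr_invariant (summ.toList ++ hyps.toList)
  refine Prod.ext ?_ ?_ <;> refine List.map_congr_left fun c hc => ?_
  · rw [getD_fold_insert_fun _ _ _ c
      ((PySem.Set.mem_ofList _ c).mpr (List.mem_append_left _ hc))]
    exact hget c (List.mem_append_left _ hc)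
  · rw [getD_fold_insert_fun _ _ _ c
      ((PySem.Set.mem_ofList _ c).mpr (List.mem_append_right _ hc))]
    exact hget c (List.mem_append_right _ hc)
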